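-- pv_equiv track=rewrite | github.com/chrismellorex1/Python-examples | mergeProds.py | _parseUGCLine
-- ===== SOURCE A (Python) =====
-- def _parseUGCLine(ugcString):
--     """Parses a ugc encoded string into a list of UGC codes.
--
--     Input string must be of form "VAZ001-004>006" without the -ddhhmm-
--     terminator. Returns a list of strings of UGC codes:
--     ["VAZ001","VAZ004","VAZ005","VAZ006"]."""
--
--     # Parses UGC encoding
--     ugc=ugcString.split("-")
--     ugcList=[]
--     stc=ugcString[0:3]
--     for c in ugc:
--         if c.find(">") > 1:
--             startUGC, endUGC=c.split(">")
--             if len(startUGC) > 3: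
--                 stc=startUGC[0:3]
--                 startUGC=startUGC[3:]
--             for i in range(int(startUGC), int(endUGC) + 1):
--                 ugcList.append("%s%3.3d" % (stc, i))
--         elif len(c) > 3:
--             stc=c[0:3]
--             ugcList.append(c)
--         else:
--             ugcList.append(stc + c)
--     return ugcList
-- ===== SOURCE B (Python) =====
-- def _expandUGC(d):
--     """Expand one descriptor tuple into its list of UGC code strings."""
--     if d[0] == "range":
--         _, stc, a, b = d
--         return ["%s%3.3d" % (stc, i) for i in range(a, b + 1)]
--     elif d[0] == "full":
--         return [d[1]]
--     else:
--         return [d[1] + d[2]]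
--
--
-- def _parseUGCLine(ugcString):
--     """Two-pass re-implementation: pass 1 parses the '-'-separated segments
--     into descriptor tuples while tracking the carried state code; pass 2
--     flattens the descriptors into the final list of UGC codes."""
--     descs = []
--     stc = ugcString[0:3]
--     for c in ugcString.split("-"):
--         if c.find(">") > 1:
--             startUGC, endUGC = c.split(">")
--             if len(startUGC) > 3:
--                 stc = startUGC[0:3]
--                 startUGC = startUGC[3:]
--             descs.append(("range", stc, int(startUGC), int(endUGC)))
--         elif len(c) > 3:
--             stc = c[0:3]
--             descs.append(("full", c))
--         else:
--             descs.append(("short", stc, c))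
--     return [code for d in descs for code in _expandUGC(d)]
-- ===== Notes on version B (the rewrite author's own statement) =====
-- stated objective: alternative
-- what changed: A's single interleaved loop is split into a two-pass pipeline: pass 1 parses the '-'-segments into descriptor tuples ('range'/'full'/'short') while tracking the carried state code, pass 2 flattens the descriptors into the output with a comprehension.
import Mathlib
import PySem

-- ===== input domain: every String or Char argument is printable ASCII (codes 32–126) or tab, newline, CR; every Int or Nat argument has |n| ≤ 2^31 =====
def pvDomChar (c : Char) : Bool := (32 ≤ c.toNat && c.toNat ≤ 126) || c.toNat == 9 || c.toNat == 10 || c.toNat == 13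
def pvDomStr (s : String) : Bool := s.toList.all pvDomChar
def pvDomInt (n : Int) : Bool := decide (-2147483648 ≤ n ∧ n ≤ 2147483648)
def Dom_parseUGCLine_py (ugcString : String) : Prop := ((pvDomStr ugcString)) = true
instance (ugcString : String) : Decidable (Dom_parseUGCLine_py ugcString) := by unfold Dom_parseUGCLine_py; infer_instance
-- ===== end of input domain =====

-- B re-implements A as a two-pass pipeline (parse segments to descriptors, then expand);
-- same cost, no speed claim.

-- ===== PORT A =====

-- "%3.3d" % i, hand-ported (no PySem %-format): zero-pad |i| to 3 digits, '-' in front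
-- for negatives; exact for every Int (checked against CPython).
def pvFmt3 (i : Int) : List Char :=
  (if i < 0 then ['-'] else []) ++ PySem.Chars.zfill (PySem.Int.toChars (Int.natAbs i : Int)) 3

-- A's loop over the '-'-split segments; `none` exactly where Python raises
-- (a segment with '>' at index ≥ 2 that has a second '>' or whose parts fail int()).
def parseA_go : List (List Char) → List Char → List String → Option (List String)
  | [], _, acc => some acc
  | c :: rest, stc, acc =>
    if PySem.Chars.find c ['>'] > 1 then
      match PySem.Chars.splitOn c ['>'] with
      | [startUGC, endUGC] =>
        let stc' := if startUGC.length > 3 then PySem.List.slice startUGC (some 0) (some 3) else stc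
        let start' := if startUGC.length > 3 then PySem.List.slice startUGC (some 3) none else startUGC
        match PySem.Int.ofChars? start', PySem.Int.ofChars? endUGC with
        | some a, some b =>
            parseA_go rest stc'
              ((PySem.List.pyRange a (b + 1) 1).foldl
                (fun L i => L ++ [String.ofList (stc' ++ pvFmt3 i)]) acc)
        | _, _ => none
      | _ => none
    else if c.length > 3 then
      parseA_go rest (PySem.List.slice c (some 0) (some 3)) (acc ++ [String.ofList c])
    else
      parseA_go rest stc (acc ++ [String.ofList (stc ++ c)])

def parseUGCLine_py (ugcString : String) : List String :=
  (parseA_go (PySem.Chars.splitOn ugcString.toList ['-'])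
    (PySem.List.slice ugcString.toList (some 0) (some 3)) []).getD []

-- ===== PORT B =====

-- descriptor tuples of Source B ("range", stc, a, b) / ("full", c) / ("short", stc, c)
inductive UGCDesc
  | range : List Char → Int → Int → UGCDesc
  | full  : List Char → UGCDesc
  | short : List Char → List Char → UGCDesc
deriving DecidableEq, Repr

-- Source B's _expandUGC
def expandUGC : UGCDesc → List String
  | .range stc a b => (PySem.List.pyRange a (b + 1) 1).map (fun i => String.ofList (stc ++ pvFmt3 i))
  | .full c => [String.ofList c]
  | .short stc c => [String.ofList (stc ++ c)]

-- pass 1 of Source B: segments → descriptor list (none exactly where Python raises)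
def parseB_pass1 : List (List Char) → List Char → Option (List UGCDesc)
  | [], _ => some []
  | c :: rest, stc =>
    if PySem.Chars.find c ['>'] > 1 then
      match PySem.Chars.splitOn c ['>'] with
      | [startUGC, endUGC] =>
        let stc' := if startUGC.length > 3 then PySem.List.slice startUGC (some 0) (some 3) else stc
        let start' := if startUGC.length > 3 then PySem.List.slice startUGC (some 3) none else startUGC
        match PySem.Int.ofChars? start', PySem.Int.ofChars? endUGC with
        | some a, some b => (parseB_pass1 rest stc').map (fun ds => UGCDesc.range stc' a b :: ds)
        | _, _ => none
      | _ => none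
    else if c.length > 3 then
      (parseB_pass1 rest (PySem.List.slice c (some 0) (some 3))).map (fun ds => UGCDesc.full c :: ds)
    else
      (parseB_pass1 rest stc).map (fun ds => UGCDesc.short stc c :: ds)

def parseUGCLine_py_alt (ugcString : String) : List String :=
  ((parseB_pass1 (PySem.Chars.splitOn ugcString.toList ['-'])
      (PySem.List.slice ugcString.toList (some 0) (some 3))).map
    (fun ds => ds.flatMap expandUGC)).getD []

-- ===== PRECONDITION & SPEC =====

-- Shape check on one '-'-segment: if it carries '>' at index ≥ 2 it must split into
-- exactly two parts that (after the [3:] strip of a long start) parse as Python ints.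
def pvSegOK (c : List Char) : Bool :=
  if PySem.Chars.find c ['>'] > 1 then
    match PySem.Chars.splitOn c ['>'] with
    | [s, e] =>
        (PySem.Int.ofChars? (if s.length > 3 then PySem.List.slice s (some 3) none else s)).isSome
          && (PySem.Int.ofChars? e).isSome
    | _ => false
  else true

-- Pre_ excludes exactly the inputs on which Python A raises ValueError: a '-'-segment
-- with '>' at index ≥ 2 that contains a second '>' (unpacking fails) or whose range
-- bounds fail int().  A returns on every admitted input.
def Pre_parseUGCLine_py (ugcString : String) : Prop :=
  (PySem.Chars.splitOn ugcString.toList ['-']).all pvSegOK = true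

instance (ugcString : String) : Decidable (Pre_parseUGCLine_py ugcString) := by
  unfold Pre_parseUGCLine_py; infer_instance

def pvWitness_parseUGCLine_py : String := "VAZ001-004>006"

def Spec_parseUGCLine_py (ugcString : String) (out : List String) : Prop := out = parseUGCLine_py_alt ugcString
instance (ugcString : String) (out : List String) : Decidable (Spec_parseUGCLine_py ugcString out) := by unfold Spec_parseUGCLine_py; infer_instance

-- ===== CLAIM (what is proved, stated in full; the proofs are below) =====
def Claim_equal_parseUGCLine_py : Prop := ∀ (ugcString : String), Dom_parseUGCLine_py ugcString → Pre_parseUGCLine_py ugcString → Spec_parseUGCLine_py ugcString (parseUGCLine_py ugcString)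

-- ===== LEMMAS AND PROOFS =====

-- A's accumulating loop equals pass 1 of B followed by the flatMap expansion.
lemma parseA_go_eq_pass1 (segs : List (List Char)) :
    ∀ (stc : List Char) (acc : List String),
      parseA_go segs stc acc
        = (parseB_pass1 segs stc).map (fun ds => acc ++ ds.flatMap expandUGC) := by
  induction segs with
  | nil => intro stc acc; simp [parseA_go, parseB_pass1]
  | cons c rest ih =>
    intro stc acc
    simp only [parseA_go, parseB_pass1]
    split_ifs with h1 h2
    · cases hsp : PySem.Chars.splitOn c ['>'] with
      | nil => rfl
      | cons s t =>
        cases t with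
        | nil => rfl
        | cons e t' =>
          cases t' with
          | nil =>
            simp only
            cases ha : PySem.Int.ofChars?
                (if s.length > 3 then PySem.List.slice s (some 3) none else s) with
            | none => rfl
            | some a =>
              cases hb : PySem.Int.ofChars? e with
              | none => rfl
              | some b =>
                dsimp only
                rw [ih, PySem.List.foldl_append_singleton_eq_map]
                cases parseB_pass1 rest
                    (if s.length > 3 then PySem.List.slice s (some 0) (some 3) else stc) with
                | none => rfl
                | some ds => simp [expandUGC]
          | cons _ _ => rfl
    · rw [ih]
      cases parseB_pass1 rest (PySem.List.slice c (some 0) (some 3)) with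
      | none => rfl
      | some ds => simp [expandUGC]
    · rw [ih]
      cases parseB_pass1 rest stc with
      | none => rfl
      | some ds => simp [expandUGC]

-- ===== VERDICT (by name: the statement is the Claim_ definition above) =====
theorem parseUGCLine_py_spec : Claim_equal_parseUGCLine_py := by
  intro ugcString _ _
  unfold Spec_parseUGCLine_py parseUGCLine_py parseUGCLine_py_alt
  rw [parseA_go_eq_pass1]
  cases parseB_pass1 (PySem.Chars.splitOn ugcString.toList ['-'])
      (PySem.List.slice ugcString.toList (some 0) (some 3)) with
  | none => rfl
  | some ds => simp
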